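-- pv_equiv track=rewrite | github.com/selvi7/samplepyhon | ss37.py | minStepToDeleteString
-- ===== SOURCE A (Python) =====
-- def minStepToDeleteString(str):
--
--     N = len(str)
--
--     # declare dp array and initialize
--     # it with 0s
--     ds = [[0 for x in range(N + 1)]
--              for y in range(N + 1)]
--
--     # loop for substring length
--     # we are considering
--     for l in range(1, N + 1):
--
--         # loop with two variables i and j, denoting
--         # starting and ending of substrings
--         i = 0
--         j = l - 1
--         while j < N:
--
--             # If substring length is 1,
--             # then 1 step will be needed
--             if (l == 1):
--                 ds[i][j] = 1
--             else:
--
--                 # delete the ith char individually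
--                 # and assign result for subproblem (i+1,j)
--                 ds[i][j] = 1 + ds[i + 1][j]
--
--                 # if current and next char are
--                 # same, choose min from current
--                 # and subproblem (i+2,j)
--                 if (str[i] == str[i + 1]):
--                     ds[i][j] = min(1 + ds[i + 2][j], ds[i][j])
--
--                 ''' loop over all right characters and suppose
--                     Kth char is same as ith character then
--                     choose minimum from current and two
--                     substring after ignoring ith and Kth char '''
--                 for K in range(i + 2, j + 1):
--                     if (str[i] == str[K]):
--                         ds[i][j] = min(ds[i + 1][K - 1] +
--                                        ds[K + 1][j], ds[i][j])
--
--             i += 1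
--             j += 1
--
--     # Uncomment below snippet to print
--     # actual dp tablex
--     # for (int i = 0; i < N; i++, cout << endl)
--     # for (int j = 0; j < N; j++)
--     #     cout << dp[i][j] << " ";
--
--     return ds[0][N - 1]
-- ===== SOURCE B (Python) =====
-- def minStepToDeleteString(str):
--     n = len(str)
--     memo = {}
--
--     def solve(i, j):
--         # steps to delete substring str[i..j]
--         if i > j:
--             return 0
--         if i == j:
--             return 1
--         key = (i, j)
--         if key in memo:
--             return memo[key]
--         best = 1 + solve(i + 1, j)
--         if str[i] == str[i + 1]:
--             best = min(best, 1 + solve(i + 2, j))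
--         for K in range(i + 2, j + 1):
--             if str[i] == str[K]:
--                 best = min(best, solve(i + 1, K - 1) + solve(K + 1, j))
--         memo[key] = best
--         return best
--
--     return solve(0, n - 1)
-- ===== Notes on version B (the rewrite author's own statement) =====
-- stated objective: alternative
-- what changed: A fills a zero-initialised (N+1)x(N+1) table iteratively, bottom-up by substring length with a diagonal while-loop; B is a top-down recursive solve(i, j) with a dict memo, explicit i>j / i==j base cases (which also cover the empty string), computing only the subproblems reachable from (0, n-1) on demand.
import Mathlib
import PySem

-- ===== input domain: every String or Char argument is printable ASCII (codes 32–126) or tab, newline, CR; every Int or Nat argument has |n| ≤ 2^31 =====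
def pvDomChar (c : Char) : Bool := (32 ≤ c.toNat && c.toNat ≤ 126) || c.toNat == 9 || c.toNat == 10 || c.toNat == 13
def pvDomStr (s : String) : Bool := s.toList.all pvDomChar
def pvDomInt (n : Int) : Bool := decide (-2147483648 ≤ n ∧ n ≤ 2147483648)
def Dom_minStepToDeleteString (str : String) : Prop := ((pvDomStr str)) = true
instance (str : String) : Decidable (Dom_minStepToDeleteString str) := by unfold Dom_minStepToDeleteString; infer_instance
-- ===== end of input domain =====

-- B replaces A's iterative bottom-up span-length table sweep by a top-down recursive
-- solve(i, j) with a dict memo and explicit i > j / i == j base cases; same O(n^3) cost,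
-- alternative decomposition.

-- ===== PORT A =====
-- A's 2-D zero-initialised (N+1)x(N+1) list-of-lists; reads/writes via getD/set are exact on
-- the in-range indices A uses; the final ds[0][N - 1] read uses pyGet? so Python's
-- negative-index rule (N = 0) is exact.
def pvA_get (ds : List (List Int)) (a b : Nat) : Int := (ds.getD a []).getD b 0

def pvA_set (ds : List (List Int)) (i j : Nat) (v : Int) : List (List Int) :=
  ds.set i ((ds.getD i []).set j v)

-- body of A's while loop for one cell (i, j) at substring length l
def pvA_cell (s : List Char) (ds : List (List Int)) (l i j : Nat) : Int :=
  if l = 1 then 1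
  else
    let v1 : Int := 1 + pvA_get ds (i + 1) j
    let v2 : Int := if s.getD i ' ' = s.getD (i + 1) ' ' then min (1 + pvA_get ds (i + 2) j) v1 else v1
    (List.range' (i + 2) (j - (i + 1))).foldl
      (fun cur K => if s.getD i ' ' = s.getD K ' ' then
          min (pvA_get ds (i + 1) (K - 1) + pvA_get ds (K + 1) j) cur else cur) v2

-- 'for l in range(1, N+1)' outer loop; the while loop walks i = 0 .. N-l (j = i+l-1 < N)
def pvA_table (s : List Char) (N : Nat) : List (List Int) :=
  ((List.range N).map (· + 1)).foldl
    (fun ds l =>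
      (List.range (N + 1 - l)).foldl
        (fun ds2 i => pvA_set ds2 i (i + l - 1) (pvA_cell s ds2 l i (i + l - 1))) ds)
    (List.replicate (N + 1) (List.replicate (N + 1) (0 : Int)))

def minStepToDeleteString (str : String) : Int :=
  let s := str.toList
  let N := s.length
  let ds := pvA_table s N
  (PySem.List.pyGet? (ds.getD 0 []) ((N : Int) - 1)).getD 0

-- ===== PORT B =====
-- B's recursive solve(i, j) with its dict memo threaded through the calls explicitly.
-- The fuel argument (every recursive call shrinks the span j - i, so fuel ≥ span suffices)
-- only makes the recursion structurally total; it never alters a computed value.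
-- Character reads str[i] are on in-range non-negative indices, where getD is exact.
def pvSolve (s : List Char) : Nat → Int → Int → PySem.Dict (Int × Int) Int →
    Int × PySem.Dict (Int × Int) Int
  | 0, _, _, m => (0, m)
  | fuel + 1, i, j, m =>
    if i > j then (0, m)
    else if i = j then (1, m)
    else
      match m.get? (i, j) with
      | some v => (v, m)
      | none =>
        let r1 := pvSolve s fuel (i + 1) j m
        let best : Int := 1 + r1.1
        let r2 := if s.getD i.toNat ' ' = s.getD (i + 1).toNat ' '
          then
            let q := pvSolve s fuel (i + 2) j r1.2
            (min best (1 + q.1), q.2)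
          else (best, r1.2)
        let r3 := (PySem.List.pyRange (i + 2) (j + 1) 1).foldl
          (fun bm K =>
            if s.getD i.toNat ' ' = s.getD K.toNat ' ' then
              let a1 := pvSolve s fuel (i + 1) (K - 1) bm.2
              let a2 := pvSolve s fuel (K + 1) j a1.2
              (min bm.1 (a1.1 + a2.1), a2.2)
            else bm) r2
        (r3.1, r3.2.insert (i, j) r3.1)

def minStepToDeleteString_alt (str : String) : Int :=
  let s := str.toList
  let n := s.length
  (pvSolve s n 0 ((n : Int) - 1) PySem.Dict.empty).1

-- ===== PRECONDITION & SPEC =====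
def Spec_minStepToDeleteString (str : String) (out : Int) : Prop := out = minStepToDeleteString_alt str
instance (str : String) (out : Int) : Decidable (Spec_minStepToDeleteString str out) := by unfold Spec_minStepToDeleteString; infer_instance

-- ===== CLAIM (what is proved, stated in full; the proofs are below) =====
def Claim_equal_minStepToDeleteString : Prop := ∀ (str : String), Dom_minStepToDeleteString str → Spec_minStepToDeleteString str (minStepToDeleteString str)

-- ===== LEMMAS AND PROOFS =====

-- canonical recursive value of the subproblem on s[i..j], fuel-indexed (fuel ≥ span suffices),
-- written in B's evaluation order
def pvF (s : List Char) : Nat → Int → Int → Int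
  | 0, _, _ => 0
  | fuel+1, i, j =>
    if j < i then 0
    else if i = j then 1
    else
      let best : Int := 1 + pvF s fuel (i + 1) j
      let best2 : Int := if s.getD i.toNat ' ' = s.getD (i + 1).toNat ' '
        then min best (1 + pvF s fuel (i + 2) j) else best
      ((List.range (j - (i + 1)).toNat).map (fun (t : Nat) => i + 2 + (t : Int))).foldl
        (fun cur K => if s.getD i.toNat ' ' = s.getD K.toNat ' '
            then min cur (pvF s fuel (i + 1) (K - 1) + pvF s fuel (K + 1) j) else cur) best2

def pvFF (s : List Char) (i j : Int) : Int := pvF s (j + 1 - i).toNat i j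

theorem pvF_lt (s : List Char) (f : Nat) {i j : Int} (h : j < i) : pvF s f i j = 0 := by
  cases f with
  | zero => rfl
  | succ f => simp [pvF, h]

theorem pvF_mono (s : List Char) : ∀ f1 : Nat, ∀ f2 : Nat, ∀ i j : Int,
    (j + 1 - i).toNat ≤ f1 → (j + 1 - i).toNat ≤ f2 → pvF s f1 i j = pvF s f2 i j := by
  intro f1
  induction f1 with
  | zero =>
    intro f2 i j h1 h2
    have hj : j < i := by omega
    rw [pvF_lt s _ hj, pvF_lt s _ hj]
  | succ f ih =>
    intro f2 i j h1 h2
    by_cases hj : j < i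
    · rw [pvF_lt s _ hj, pvF_lt s _ hj]
    by_cases hij : i = j
    · cases f2 with
      | zero => omega
      | succ g => simp [pvF, hij]
    cases f2 with
    | zero => omega
    | succ g =>
      simp only [pvF, if_neg hj, if_neg hij]
      have hv1 : pvF s f (i + 1) j = pvF s g (i + 1) j := ih g (i + 1) j (by omega) (by omega)
      have hv2 : pvF s f (i + 2) j = pvF s g (i + 2) j := ih g (i + 2) j (by omega) (by omega)
      rw [hv1, hv2]
      apply PySem.List.foldl_congr_mem
      intro acc K hK
      simp at hK
      obtain ⟨t, ht, rfl⟩ := hK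
      rw [ih g (i + 1) (i + 2 + (t : Int) - 1) (by omega) (by omega),
          ih g (i + 2 + (t : Int) + 1) j (by omega) (by omega)]

theorem pvFF_lt (s : List Char) {i j : Int} (h : j < i) : pvFF s i j = 0 :=
  pvF_lt s _ h

theorem pvFF_diag (s : List Char) (i : Int) : pvFF s i i = 1 := by
  have h : (i + 1 - i).toNat = 1 := by omega
  rw [pvFF, h]
  simp [pvF]

theorem pvFF_step (s : List Char) {i j : Int} (h : i < j) :
    pvFF s i j =
      ((List.range (j - (i + 1)).toNat).map (fun (t : Nat) => i + 2 + (t : Int))).foldl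
        (fun cur K => if s.getD i.toNat ' ' = s.getD K.toNat ' '
            then min cur (pvFF s (i + 1) (K - 1) + pvFF s (K + 1) j) else cur)
        (if s.getD i.toNat ' ' = s.getD (i + 1).toNat ' '
          then min (1 + pvFF s (i + 1) j) (1 + pvFF s (i + 2) j)
          else (1 + pvFF s (i + 1) j)) := by
  have hn : (j + 1 - i).toNat = (j - i).toNat + 1 := by omega
  rw [pvFF, hn]
  have hj : ¬ j < i := by omega
  have hij : ¬ i = j := by omega
  simp only [pvF, if_neg hj, if_neg hij]
  have hv1 : pvF s (j - i).toNat (i + 1) j = pvFF s (i + 1) j :=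
    pvF_mono s _ _ _ _ (by omega) (by omega)
  have hv2 : pvF s (j - i).toNat (i + 2) j = pvFF s (i + 2) j :=
    pvF_mono s _ _ _ _ (by omega) (by omega)
  rw [hv1, hv2]
  apply PySem.List.foldl_congr_mem
  intro acc K hK
  simp at hK
  obtain ⟨t, ht, rfl⟩ := hK
  rw [pvF_mono s _ ((i + 2 + (t : Int) - 1) + 1 - (i + 1)).toNat (i + 1) (i + 2 + (t : Int) - 1)
        (by omega) (by omega),
      pvF_mono s _ (j + 1 - (i + 2 + (t : Int) + 1)).toNat (i + 2 + (t : Int) + 1) j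
        (by omega) (by omega)]
  rfl

def pvShape (N : Nat) (ds : List (List Int)) : Prop :=
  ds.length = N + 1 ∧ ∀ r ∈ ds, r.length = N + 1

theorem pvShape_set {N i j : Nat} {v : Int} {ds : List (List Int)}
    (h : pvShape N ds) (hi : i ≤ N) : pvShape N (pvA_set ds i j v) := by
  obtain ⟨h1, h2⟩ := h
  refine ⟨by simp [pvA_set, h1], ?_⟩
  intro r hr
  rcases List.mem_or_eq_of_mem_set hr with hr' | rfl
  · exact h2 r hr'
  · rw [List.length_set]
    have hi' : i < ds.length := by omega
    rw [List.getD_eq_getElem _ _ hi']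
    exact h2 _ (List.getElem_mem hi')

theorem pvA_get_set {N : Nat} {ds : List (List Int)} (h : pvShape N ds) {i j a b : Nat}
    (hi : i ≤ N) (hj : j ≤ N) {v : Int} :
    pvA_get (pvA_set ds i j v) a b = if a = i ∧ b = j then v else pvA_get ds a b := by
  obtain ⟨h1, h2⟩ := h
  have hi' : i < ds.length := by omega
  have hrow : (ds.getD i []).length = N + 1 := by
    rw [List.getD_eq_getElem _ _ hi']
    exact h2 _ (List.getElem_mem hi')
  have hrow' : (ds[i]?.getD []).length = N + 1 := by
    rw [← List.getD_eq_getElem?_getD]; exact hrow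
  simp only [pvA_get, pvA_set, List.getD_eq_getElem?_getD, List.getElem?_set]
  by_cases ha : i = a
  · rw [if_pos ha, if_pos hi', Option.getD_some, List.getElem?_set, ← ha, hrow']
    by_cases hb : j = b
    · rw [if_pos hb, if_pos (by omega), if_pos ⟨rfl, hb.symm⟩, Option.getD_some]
    · rw [if_neg hb, if_neg (by tauto)]
  · rw [if_neg ha, if_neg (by tauto)]

-- "all cells of span < l hold the canonical value (inside the triangle) and 0 outside"
def pvLow (s : List Char) (N l : Nat) (ds : List (List Int)) : Prop :=
  ∀ a b : Nat, b + 1 < a + l →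
    pvA_get ds a b = if a ≤ b ∧ b < N then pvFF s (a : Int) (b : Int) else 0

theorem pvLow_read {s : List Char} {N l : Nat} {ds : List (List Int)}
    (low : pvLow s N l ds) {a b : Nat} (h : b + 1 < a + l) (hb : b < N) :
    pvA_get ds a b = pvFF s (a : Int) (b : Int) := by
  rw [low a b h]
  by_cases hab : a ≤ b
  · simp [hab, hb]
  · rw [if_neg (by tauto), pvFF_lt s (by exact_mod_cast by omega)]

theorem pvA_cell_eq {s : List Char} {N l : Nat} {ds : List (List Int)} {i j : Nat}
    (hl : 1 ≤ l) (hj : j + 1 = i + l) (hb : j < N) (low : pvLow s N l ds) :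
    pvA_cell s ds l i j = pvFF s (i : Int) (j : Int) := by
  by_cases h1 : l = 1
  · subst h1
    have hji : j = i := by omega
    subst hji
    simp [pvA_cell, pvFF_diag]
  · have hij : i < j := by omega
    have hijI : (i : Int) < (j : Int) := by exact_mod_cast hij
    have t0 : ((i : Int)).toNat = i := by omega
    have t1 : ((i : Int) + 1).toNat = i + 1 := by omega
    have e1 : ((i : Int) + 1) = ((i + 1 : Nat) : Int) := by push_cast; ring
    have e2 : ((i : Int) + 2) = ((i + 2 : Nat) : Int) := by push_cast; ring
    have r1 : pvA_get ds (i + 1) j = pvFF s ((i : Int) + 1) (j : Int) := by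
      rw [e1]; exact pvLow_read low (by omega) hb
    have r2 : pvA_get ds (i + 2) j = pvFF s ((i : Int) + 2) (j : Int) := by
      rw [e2]; exact pvLow_read low (by omega) hb
    simp only [pvA_cell, if_neg h1]
    rw [pvFF_step s hijI]
    rw [List.range'_eq_map_range, List.foldl_map, List.foldl_map]
    rw [show ((j : Int) - ((i : Int) + 1)).toNat = j - (i + 1) from by omega]
    have hinit : (if s.getD i ' ' = s.getD (i + 1) ' '
          then min (1 + pvA_get ds (i + 2) j) (1 + pvA_get ds (i + 1) j) else 1 + pvA_get ds (i + 1) j)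
        = (if s.getD ((i : Int)).toNat ' ' = s.getD ((i : Int) + 1).toNat ' '
          then min (1 + pvFF s ((i : Int) + 1) (j : Int)) (1 + pvFF s ((i : Int) + 2) (j : Int))
          else 1 + pvFF s ((i : Int) + 1) (j : Int)) := by
      rw [r1, r2, t0, t1, min_comm]
    rw [hinit]
    apply PySem.List.foldl_congr_mem
    intro acc t ht
    simp at ht
    have tK : ((i : Int) + 2 + (t : Int)).toNat = i + 2 + t := by omega
    have eA : ((i : Int) + 2 + (t : Int) - 1) = ((i + 1 + t : Nat) : Int) := by push_cast; ring
    have eB : ((i : Int) + 2 + (t : Int) + 1) = ((i + 3 + t : Nat) : Int) := by push_cast; ring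
    have nA : i + 2 + t - 1 = i + 1 + t := by omega
    have nB : i + 2 + t + 1 = i + 3 + t := by omega
    have rA : pvA_get ds (i + 1) (i + 1 + t) = pvFF s ((i + 1 : Nat) : Int) ((i + 1 + t : Nat) : Int) :=
      pvLow_read low (by omega) (by omega)
    have rB : pvA_get ds (i + 3 + t) j = pvFF s ((i + 3 + t : Nat) : Int) (j : Int) :=
      pvLow_read low (by omega) (by omega)
    rw [nA, nB, rA, rB, t0, tK, eA, eB, e1, min_comm]

-- A-side row invariant: spans < l are final; span-l cells are final for start < m, 0 otherwise
def pvRowInvA (s : List Char) (N l m : Nat) (ds : List (List Int)) : Prop :=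
  ∀ a b : Nat, pvA_get ds a b =
    if a ≤ b ∧ b < N ∧ (b + 1 < a + l ∨ (b + 1 = a + l ∧ a < m)) then pvFF s (a : Int) (b : Int) else 0

theorem pvRowInvA_low {s : List Char} {N l m : Nat} {ds : List (List Int)}
    (h : pvRowInvA s N l m ds) : pvLow s N l ds := by
  intro a b hab
  rw [h a b]
  by_cases h1 : a ≤ b ∧ b < N
  · rw [if_pos ⟨h1.1, h1.2, Or.inl hab⟩, if_pos h1]
  · rw [if_neg (by tauto), if_neg h1]

theorem pvRowA_step {s : List Char} {N l m : Nat} {ds : List (List Int)}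
    (h : pvRowInvA s N l m ds) (hsh : pvShape N ds) (hl : 1 ≤ l) (hm : m + l ≤ N) :
    pvRowInvA s N l (m + 1)
        (pvA_set ds m (m + l - 1) (pvA_cell s ds l m (m + l - 1)))
      ∧ pvShape N (pvA_set ds m (m + l - 1) (pvA_cell s ds l m (m + l - 1))) := by
  have hcell : pvA_cell s ds l m (m + l - 1) = pvFF s (m : Int) ((m + l - 1 : Nat) : Int) :=
    pvA_cell_eq hl (by omega) (by omega) (pvRowInvA_low h)
  refine ⟨?_, pvShape_set hsh (by omega)⟩
  intro a b
  rw [pvA_get_set hsh (by omega) (by omega)]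
  by_cases hab : a = m ∧ b = m + l - 1
  · obtain ⟨rfl, rfl⟩ := hab
    rw [if_pos ⟨rfl, rfl⟩, hcell, if_pos ⟨by omega, by omega, Or.inr ⟨by omega, by omega⟩⟩]
  · rw [if_neg hab, h a b]
    exact if_congr (by omega) rfl rfl

theorem pvRowA_iter {s : List Char} {N l : Nat} (hl : 1 ≤ l) :
    ∀ m, m ≤ N + 1 - l → ∀ ds : List (List Int), pvRowInvA s N l 0 ds → pvShape N ds →
      pvRowInvA s N l m
          ((List.range m).foldl
            (fun ds2 i => pvA_set ds2 i (i + l - 1) (pvA_cell s ds2 l i (i + l - 1))) ds)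
        ∧ pvShape N
          ((List.range m).foldl
            (fun ds2 i => pvA_set ds2 i (i + l - 1) (pvA_cell s ds2 l i (i + l - 1))) ds) := by
  intro m
  induction m with
  | zero => intro _ ds h hsh; exact ⟨by simpa using h, by simpa using hsh⟩
  | succ m ih =>
    intro hm ds h hsh
    rw [List.range_succ, List.foldl_append]
    obtain ⟨ih1, ih2⟩ := ih (by omega) ds h hsh
    exact pvRowA_step ih1 ih2 hl (by omega)

-- A-side phase invariant: all spans ≤ l final inside the triangle, all other cells 0
def pvInvA (s : List Char) (N l : Nat) (ds : List (List Int)) : Prop :=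
  ∀ a b : Nat, pvA_get ds a b = if a ≤ b ∧ b < N ∧ b + 1 ≤ a + l then pvFF s (a : Int) (b : Int) else 0

theorem pvA_phase {s : List Char} {N l : Nat} {ds : List (List Int)}
    (hl : 1 ≤ l) (hlN : l ≤ N) (h : pvInvA s N (l - 1) ds) (hsh : pvShape N ds) :
    pvInvA s N l
        ((List.range (N + 1 - l)).foldl
          (fun ds2 i => pvA_set ds2 i (i + l - 1) (pvA_cell s ds2 l i (i + l - 1))) ds)
      ∧ pvShape N
        ((List.range (N + 1 - l)).foldl
          (fun ds2 i => pvA_set ds2 i (i + l - 1) (pvA_cell s ds2 l i (i + l - 1))) ds) := by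
  have h0 : pvRowInvA s N l 0 ds := by
    intro a b
    rw [h a b]
    exact if_congr (by omega) rfl rfl
  obtain ⟨hrow, hsh'⟩ := pvRowA_iter hl (N + 1 - l) (by omega) ds h0 hsh
  refine ⟨?_, hsh'⟩
  intro a b
  rw [hrow a b]
  exact if_congr (by omega) rfl rfl

theorem pvA_outer (s : List Char) (N : Nat) : ∀ l, l ≤ N →
    pvInvA s N l
        (((List.range l).map (· + 1)).foldl
          (fun ds l =>
            (List.range (N + 1 - l)).foldl
              (fun ds2 i => pvA_set ds2 i (i + l - 1) (pvA_cell s ds2 l i (i + l - 1))) ds)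
          (List.replicate (N + 1) (List.replicate (N + 1) (0 : Int))))
      ∧ pvShape N
        (((List.range l).map (· + 1)).foldl
          (fun ds l =>
            (List.range (N + 1 - l)).foldl
              (fun ds2 i => pvA_set ds2 i (i + l - 1) (pvA_cell s ds2 l i (i + l - 1))) ds)
          (List.replicate (N + 1) (List.replicate (N + 1) (0 : Int)))) := by
  intro l
  induction l with
  | zero =>
    refine fun _ => ⟨?_, ?_⟩
    · intro a b
      rw [if_neg (by omega)]
      simp only [List.range_zero, List.map_nil, List.foldl_nil, pvA_get,
        List.getD_eq_getElem?_getD, List.getElem?_replicate]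
      rcases Nat.lt_or_ge a (N + 1) with ha | ha
      · rw [if_pos ha]
        simp only [Option.getD_some, List.getElem?_replicate]
        rcases Nat.lt_or_ge b (N + 1) with hb | hb
        · rw [if_pos hb]
          rfl
        · rw [if_neg (by omega)]
          rfl
      · rw [if_neg (by omega)]
        simp
    · refine ⟨by simp, ?_⟩
      intro r hr
      simp only [List.range_zero, List.map_nil, List.foldl_nil] at hr
      rw [List.eq_of_mem_replicate hr]
      simp
  | succ l ih =>
    intro hlN
    rw [List.range_succ, List.map_append, List.foldl_append]
    obtain ⟨ih1, ih2⟩ := ih (by omega)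
    exact pvA_phase (by omega) (by omega) (by simpa using ih1) ih2

theorem pvA_final (str : String) :
    minStepToDeleteString str = pvFF str.toList 0 ((str.toList.length : Int) - 1) := by
  obtain ⟨htab, hsh⟩ : pvInvA str.toList str.toList.length str.toList.length
        (pvA_table str.toList str.toList.length)
      ∧ pvShape str.toList.length (pvA_table str.toList str.toList.length) :=
    pvA_outer _ _ _ le_rfl
  simp only [minStepToDeleteString]
  cases hN : str.toList.length with
  | zero =>
    rw [hN] at htab hsh
    have hrowlen : ((pvA_table str.toList 0).getD 0 []).length = 1 := by
      rw [List.getD_eq_getElem _ _ (by rw [hsh.1]; omega)]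
      exact hsh.2 _ (List.getElem_mem (by rw [hsh.1]; omega))
    obtain ⟨x, hx⟩ := List.length_eq_one_iff.mp hrowlen
    have h0 : x = 0 := by
      have hv := htab 0 0
      rw [if_neg (by omega)] at hv
      unfold pvA_get at hv
      rw [hx] at hv
      simpa using hv
    rw [show ((0 : Nat) : Int) - 1 = -1 from by norm_num,
        pvFF_lt str.toList (show (-1 : Int) < 0 from by norm_num), hx, h0]
    rfl
  | succ M =>
    rw [hN] at htab hsh
    have hrowlen : ((pvA_table str.toList (M + 1)).getD 0 []).length = M + 2 := by
      rw [List.getD_eq_getElem _ _ (by rw [hsh.1]; omega)]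
      exact hsh.2 _ (List.getElem_mem (by rw [hsh.1]; omega))
    have hM2 : M < ((pvA_table str.toList (M + 1)).getD 0 []).length := by
      rw [hrowlen]; omega
    have hv : ((M + 1 : Nat) : Int) - 1 = ((M : Nat) : Int) := by push_cast; ring
    rw [hv, PySem.List.pyGet?_natCast]
    have hrow : ((pvA_table str.toList (M + 1)).getD 0 [])[M]?
        = some (pvA_get (pvA_table str.toList (M + 1)) 0 M) := by
      unfold pvA_get
      rw [List.getElem?_eq_getElem hM2, List.getD_eq_getElem _ _ hM2]
    rw [hrow, Option.getD_some, htab 0 M, if_pos ⟨by omega, by omega, by omega⟩]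
    norm_num

-- B-side invariant: every entry of the memo is the canonical value of its subproblem
def pvGood (s : List Char) (m : PySem.Dict (Int × Int) Int) : Prop :=
  ∀ a b v : Int, m.get? (a, b) = some v → v = pvFF s a b

theorem pvSolve_fold {s : List Char} {fuel : Nat}
    (ih : ∀ i j : Int, ∀ m, (j + 1 - i).toNat ≤ fuel → pvGood s m →
      (pvSolve s fuel i j m).1 = pvFF s i j ∧ pvGood s (pvSolve s fuel i j m).2)
    (i j : Int) :
    ∀ ks : List Int, (∀ K ∈ ks, (K - 1 + 1 - (i + 1)).toNat ≤ fuel ∧ (j + 1 - (K + 1)).toNat ≤ fuel) →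
    ∀ b : Int, ∀ m, pvGood s m →
      ((ks.foldl
          (fun bm K =>
            if s.getD i.toNat ' ' = s.getD K.toNat ' ' then
              (min bm.1
                  ((pvSolve s fuel (i + 1) (K - 1) bm.2).1 +
                    (pvSolve s fuel (K + 1) j (pvSolve s fuel (i + 1) (K - 1) bm.2).2).1),
                (pvSolve s fuel (K + 1) j (pvSolve s fuel (i + 1) (K - 1) bm.2).2).2)
            else bm) (b, m)).1
        = ks.foldl
          (fun cur K => if s.getD i.toNat ' ' = s.getD K.toNat ' '
            then min cur (pvFF s (i + 1) (K - 1) + pvFF s (K + 1) j) else cur) b)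
      ∧ pvGood s (ks.foldl
          (fun bm K =>
            if s.getD i.toNat ' ' = s.getD K.toNat ' ' then
              (min bm.1
                  ((pvSolve s fuel (i + 1) (K - 1) bm.2).1 +
                    (pvSolve s fuel (K + 1) j (pvSolve s fuel (i + 1) (K - 1) bm.2).2).1),
                (pvSolve s fuel (K + 1) j (pvSolve s fuel (i + 1) (K - 1) bm.2).2).2)
            else bm) (b, m)).2 := by
  intro ks
  induction ks with
  | nil => intro _ b m hg; exact ⟨rfl, hg⟩
  | cons K ks ihk =>
    intro hks b m hg
    obtain ⟨hK1, hK2⟩ := hks K (List.mem_cons_self)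
    simp only [List.foldl_cons]
    by_cases hc : s.getD i.toNat ' ' = s.getD K.toNat ' '
    · rw [if_pos hc, if_pos hc]
      obtain ⟨ha1, hg1⟩ := ih (i + 1) (K - 1) m hK1 hg
      obtain ⟨ha2, hg2⟩ := ih (K + 1) j _ hK2 hg1
      simp only [ha1, ha2]
      exact ihk (fun K' hK' => hks K' (List.mem_cons_of_mem _ hK')) _ _ hg2
    · rw [if_neg hc, if_neg hc]
      exact ihk (fun K' hK' => hks K' (List.mem_cons_of_mem _ hK')) _ _ hg

theorem pvSolve_spec (s : List Char) : ∀ fuel : Nat, ∀ i j : Int, ∀ m,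
    (j + 1 - i).toNat ≤ fuel → pvGood s m →
    (pvSolve s fuel i j m).1 = pvFF s i j ∧ pvGood s (pvSolve s fuel i j m).2 := by
  intro fuel
  induction fuel with
  | zero =>
    intro i j m hf hg
    have hj : j < i := by omega
    exact ⟨(pvFF_lt s hj).symm, hg⟩
  | succ fuel ih =>
    intro i j m hf hg
    by_cases hij : i > j
    · simp only [pvSolve, if_pos hij]
      exact ⟨(pvFF_lt s hij).symm, hg⟩
    by_cases heq : i = j
    · simp only [pvSolve, if_neg hij, if_pos heq]
      exact ⟨by rw [heq, pvFF_diag], hg⟩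
    have hlt : i < j := by omega
    cases hm : m.get? (i, j) with
    | some v =>
      simp only [pvSolve, if_neg hij, if_neg heq, hm]
      exact ⟨hg i j v hm, hg⟩
    | none =>
      simp only [pvSolve, if_neg hij, if_neg heq, hm]
      obtain ⟨h1, hg1⟩ := ih (i + 1) j m (by omega) hg
      have hrange : PySem.List.pyRange (i + 2) (j + 1) 1
          = (List.range (j - (i + 1)).toNat).map (fun (t : Nat) => i + 2 + (t : Int)) := by
        rw [PySem.List.pyRange_one,
          show (j + 1 - (i + 2)).toNat = (j - (i + 1)).toNat from by omega]
      by_cases hc : s.getD i.toNat ' ' = s.getD (i + 1).toNat ' '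
      · simp only [if_pos hc]
        obtain ⟨h2, hg2⟩ := ih (i + 2) j _ (by omega) hg1
        rw [hrange, h1, h2]
        obtain ⟨hfold, hgf⟩ := pvSolve_fold ih i j
          ((List.range (j - (i + 1)).toNat).map (fun (t : Nat) => i + 2 + (t : Int)))
          (by
            intro K hK
            simp at hK
            obtain ⟨t, ht, rfl⟩ := hK
            constructor <;> omega)
          (min (1 + pvFF s (i + 1) j) (1 + pvFF s (i + 2) j))
          _ hg2
        rw [hfold]
        have hres : ((List.range (j - (i + 1)).toNat).map (fun (t : Nat) => i + 2 + (t : Int))).foldl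
            (fun cur K => if s.getD i.toNat ' ' = s.getD K.toNat ' '
              then min cur (pvFF s (i + 1) (K - 1) + pvFF s (K + 1) j) else cur)
            (min (1 + pvFF s (i + 1) j) (1 + pvFF s (i + 2) j)) = pvFF s i j := by
          rw [pvFF_step s hlt, if_pos hc]
        rw [hres]
        refine ⟨rfl, ?_⟩
        intro a b v hv
        rw [PySem.Dict.get?_insert] at hv
        by_cases hk : (a, b) = (i, j)
        · rw [if_pos hk] at hv
          injection hk with hk1 hk2
          subst hk1; subst hk2
          exact (Option.some_injective _ hv).symm
        · rw [if_neg hk] at hv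
          exact hgf a b v hv
      · simp only [if_neg hc]
        rw [hrange, h1]
        obtain ⟨hfold, hgf⟩ := pvSolve_fold ih i j
          ((List.range (j - (i + 1)).toNat).map (fun (t : Nat) => i + 2 + (t : Int)))
          (by
            intro K hK
            simp at hK
            obtain ⟨t, ht, rfl⟩ := hK
            constructor <;> omega)
          (1 + pvFF s (i + 1) j) _ hg1
        rw [hfold]
        have hres : ((List.range (j - (i + 1)).toNat).map (fun (t : Nat) => i + 2 + (t : Int))).foldl
            (fun cur K => if s.getD i.toNat ' ' = s.getD K.toNat ' '
              then min cur (pvFF s (i + 1) (K - 1) + pvFF s (K + 1) j) else cur)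
            (1 + pvFF s (i + 1) j) = pvFF s i j := by
          rw [pvFF_step s hlt, if_neg hc]
        rw [hres]
        refine ⟨rfl, ?_⟩
        intro a b v hv
        rw [PySem.Dict.get?_insert] at hv
        by_cases hk : (a, b) = (i, j)
        · rw [if_pos hk] at hv
          injection hk with hk1 hk2
          subst hk1; subst hk2
          exact (Option.some_injective _ hv).symm
        · rw [if_neg hk] at hv
          exact hgf a b v hv

theorem pvB_final (str : String) :
    minStepToDeleteString_alt str = pvFF str.toList 0 ((str.toList.length : Int) - 1) := by
  have hg : pvGood str.toList PySem.Dict.empty := by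
    intro a b v hv
    rw [PySem.Dict.get?_empty] at hv
    exact absurd hv (by simp)
  have h := pvSolve_spec str.toList str.toList.length 0 ((str.toList.length : Int) - 1)
    PySem.Dict.empty (by omega) hg
  exact h.1

-- ===== VERDICT (by name: the statement is the Claim_ definition above) =====
theorem minStepToDeleteString_spec : Claim_equal_minStepToDeleteString := by
  intro str _
  unfold Spec_minStepToDeleteString
  rw [pvA_final, pvB_final]
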